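-- pv_equiv track=rewrite | github.com/rocklambros/TRACT | scripts/phase1a/regen_affected_descriptions.py | _hub_section_map
-- ===== SOURCE A (Python) =====
-- from collections import defaultdict
-- from typing import Final
--
-- AI_FRAMEWORKS: Final[frozenset[str]] = frozenset({
--     "MITRE ATLAS",
--     "NIST AI 100-2",
--     "OWASP AI Exchange",
--     "OWASP Top10 for LLM",
--     "OWASP Top10 for ML",
-- })
--
-- def _hub_section_map(links: list[dict]) -> dict[str, set[tuple[str, str]]]:
--     """Build hub_id -> set of (standard_name, section_name) for AI frameworks."""
--     result: dict[str, set[tuple[str, str]]] = defaultdict(set)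
--     for link in links:
--         if link["standard_name"] in AI_FRAMEWORKS:
--             result[link["cre_id"]].add(
--                 (link["standard_name"], link.get("section_name", ""))
--             )
--     return dict(result)
-- ===== SOURCE B (Python) =====
-- AI_FRAMEWORKS = frozenset({
--     "MITRE ATLAS",
--     "NIST AI 100-2",
--     "OWASP AI Exchange",
--     "OWASP Top10 for LLM",
--     "OWASP Top10 for ML",
-- })
--
-- def _hub_section_map(links):
--     """Build hub_id -> set of (standard_name, section_name) for AI frameworks."""
--     ai = [(l["cre_id"], (l["standard_name"], l.get("section_name", "")))
--           for l in links if l["standard_name"] in AI_FRAMEWORKS]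
--     keys = list(dict.fromkeys(k for k, _ in ai))
--     return {k: {p for kk, p in ai if kk == k} for k in keys}
-- ===== Notes on version B (the rewrite author's own statement) =====
-- stated objective: alternative
-- what changed: A accumulates hub_id -> set in one pass through a defaultdict; B first extracts the AI-framework (cre_id, pair) list, dedups the cre_ids in first-occurrence order, then builds each hub's set by a per-key grouping pass over that list.
import Mathlib
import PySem

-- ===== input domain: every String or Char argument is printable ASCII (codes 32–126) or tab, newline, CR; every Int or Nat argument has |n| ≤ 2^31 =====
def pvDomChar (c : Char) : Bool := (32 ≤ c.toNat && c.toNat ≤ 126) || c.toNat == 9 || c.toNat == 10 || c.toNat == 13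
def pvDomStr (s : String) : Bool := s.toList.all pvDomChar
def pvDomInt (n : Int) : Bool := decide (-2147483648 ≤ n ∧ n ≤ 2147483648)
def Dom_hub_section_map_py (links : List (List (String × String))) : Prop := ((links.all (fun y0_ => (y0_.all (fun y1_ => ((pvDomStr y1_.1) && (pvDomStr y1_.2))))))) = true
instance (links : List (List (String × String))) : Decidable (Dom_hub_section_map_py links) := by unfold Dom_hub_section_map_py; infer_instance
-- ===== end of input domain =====

-- B replaces A's single-pass defaultdict accumulation by a filter-and-map pass followed by an
-- ordered key dedup and a per-key grouping pass (alternative decomposition, same result).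

-- shared module constant (Python AI_FRAMEWORKS) and dict-key lookup (Python link[k] / link.get(k, d))
def AI_FRAMEWORKS : List String :=
  ["MITRE ATLAS", "NIST AI 100-2", "OWASP AI Exchange", "OWASP Top10 for LLM", "OWASP Top10 for ML"]

def pvLink (link : List (String × String)) (k : String) : Option String :=
  (link.find? (fun p => p.1 == k)).map Prod.snd

def pvLinkD (link : List (String × String)) (k d : String) : String :=
  (pvLink link k).getD d

-- ===== PORT A =====
def hub_section_map_py (links : List (List (String × String))) : List (String × List (String × String)) :=
  (links.foldl
    (fun (d : PySem.Dict String (PySem.Set (String × String))) link =>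
      if AI_FRAMEWORKS.contains (pvLinkD link "standard_name" "") then
        PySem.Dict.modify d (pvLinkD link "cre_id" "") PySem.Set.empty
          (fun s => PySem.Set.add s (pvLinkD link "standard_name" "", pvLinkD link "section_name" ""))
      else d)
    PySem.Dict.empty).items

-- ===== PORT B =====
def hub_section_map_py_alt (links : List (List (String × String))) : List (String × List (String × String)) :=
  let ai : List (String × (String × String)) :=
    (links.filter (fun l => AI_FRAMEWORKS.contains (pvLinkD l "standard_name" ""))).map
      (fun l => (pvLinkD l "cre_id" "", (pvLinkD l "standard_name" "", pvLinkD l "section_name" "")))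
  let keys := PySem.List.dedup (ai.map Prod.fst)
  keys.map (fun k => (k, PySem.Set.ofList ((ai.filter (fun p => p.1 == k)).map Prod.snd)))

-- ===== PRECONDITION & SPEC =====
-- Pre_ excludes exactly the inputs where Python A raises KeyError: a link without a
-- "standard_name" key, or an AI-framework link without a "cre_id" key.
def Pre_hub_section_map_py (links : List (List (String × String))) : Prop :=
  ∀ l ∈ links, (pvLink l "standard_name").isSome = true ∧
    (AI_FRAMEWORKS.contains (pvLinkD l "standard_name" "") = true → (pvLink l "cre_id").isSome = true)
instance (links : List (List (String × String))) : Decidable (Pre_hub_section_map_py links) := by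
  unfold Pre_hub_section_map_py; infer_instance

def pvWitness_hub_section_map_py : (List (List (String × String))) :=
  [[("standard_name", "MITRE ATLAS"), ("cre_id", "CRE-1"), ("section_name", "S1")],
   [("standard_name", "ISO 27001"), ("cre_id", "CRE-2")]]

def Spec_hub_section_map_py (links : List (List (String × String))) (out : List (String × List (String × String))) : Prop := out = hub_section_map_py_alt links
instance (links : List (List (String × String))) (out : List (String × List (String × String))) : Decidable (Spec_hub_section_map_py links out) := by unfold Spec_hub_section_map_py; infer_instance

-- ===== CLAIM (what is proved, stated in full; the proofs are below) =====
def Claim_equal_hub_section_map_py : Prop := ∀ (links : List (List (String × String))), Dom_hub_section_map_py links → Pre_hub_section_map_py links → Spec_hub_section_map_py links (hub_section_map_py links)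

-- ===== LEMMAS AND PROOFS =====

-- the filtered-and-mapped list of (cre_id, (standard_name, section_name)) pairs, B's "ai"
def pvPairs (links : List (List (String × String))) : List (String × (String × String)) :=
  (links.filter (fun l => AI_FRAMEWORKS.contains (pvLinkD l "standard_name" ""))).map
    (fun l => (pvLinkD l "cre_id" "", (pvLinkD l "standard_name" "", pvLinkD l "section_name" "")))

-- grouping of a pair list: B's result shape
def pvGrp (ps : List (String × (String × String))) : List (String × List (String × String)) :=
  (PySem.List.dedup (ps.map Prod.fst)).map
    (fun k => (k, PySem.Set.ofList ((ps.filter (fun p => p.1 == k)).map Prod.snd)))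

theorem alt_eq_grp (links : List (List (String × String))) :
    hub_section_map_py_alt links = pvGrp (pvPairs links) := rfl

theorem find?_map_pair {α : Type} (l : List String) (g : String → α) (k : String) :
    List.find? (fun p => p.1 == k) (l.map (fun k' => (k', g k'))) =
      if k ∈ l then some (k, g k) else none := by
  induction l with
  | nil => simp
  | cons a t ih =>
    by_cases h : a = k
    · subst h; simp
    · simp [h, ih, Ne.symm h]

theorem getD_grp (acc : List (String × (String × String))) (k : String) :
    PySem.Dict.getD ⟨pvGrp acc⟩ k PySem.Set.empty =
      PySem.Set.ofList ((acc.filter (fun p => p.1 == k)).map Prod.snd) := by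
  unfold PySem.Dict.getD PySem.Dict.get? pvGrp
  rw [find?_map_pair]
  split
  · rfl
  · rename_i h
    rw [PySem.List.mem_dedup] at h
    have hnil : acc.filter (fun p => p.1 == k) = [] := by
      rw [List.filter_eq_nil_iff]
      intro p hp hpk
      have hpk' : p.1 = k := by simpa using hpk
      exact h (hpk' ▸ List.mem_map_of_mem (f := Prod.fst) hp)
    simp [hnil, PySem.Set.ofList, PySem.Set.empty]

theorem contains_grp (acc : List (String × (String × String))) (k : String) :
    PySem.Dict.contains ⟨pvGrp acc⟩ k = decide (k ∈ acc.map Prod.fst) := by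
  unfold PySem.Dict.contains pvGrp
  by_cases h : k ∈ acc.map Prod.fst
  · simp only [List.any_map, Function.comp_def]
    simp [List.any_eq_true, h]
    obtain ⟨⟨p1, p2, p3⟩, hp, hpk⟩ := List.mem_map.1 h
    simp only at hpk
    subst hpk
    exact ⟨p2, p3, hp⟩
  · simp only [List.any_map, Function.comp_def]
    simp [h]
    intro x x1 x2 hm heq
    exact h (heq ▸ List.mem_map_of_mem (f := Prod.fst) hm)

theorem dedup_append_singleton {α : Type} [BEq α] [LawfulBEq α] (xs : List α) (k : α) :
    PySem.List.dedup (xs ++ [k]) =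
      if k ∈ xs then PySem.List.dedup xs else PySem.List.dedup xs ++ [k] := by
  show PySem.Set.ofList (xs ++ [k]) = _
  rw [PySem.Set.ofList_eq_foldl, List.foldl_append]
  rw [← PySem.Set.ofList_eq_foldl]
  show PySem.Set.add _ _ = _
  unfold PySem.Set.add PySem.Set.contains
  simp only [PySem.List.dedup]
  by_cases h : k ∈ xs
  · simp [h, PySem.Set.mem_ofList]
  · simp [h, PySem.Set.mem_ofList]

theorem ofList_append_singleton {α : Type} [BEq α] (zs : List α) (v : α) :
    PySem.Set.ofList (zs ++ [v]) = PySem.Set.add (PySem.Set.ofList zs) v := by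
  rw [PySem.Set.ofList_eq_foldl, List.foldl_append, ← PySem.Set.ofList_eq_foldl]
  rfl

theorem modify_grp (acc : List (String × (String × String))) (k : String) (v : String × String) :
    PySem.Dict.modify (⟨pvGrp acc⟩ : PySem.Dict String (PySem.Set (String × String))) k
        PySem.Set.empty (fun s => PySem.Set.add s v) = ⟨pvGrp (acc ++ [(k, v)])⟩ := by
  unfold PySem.Dict.modify PySem.Dict.insert
  rw [getD_grp, contains_grp]
  have hfilter : ∀ k' : String, (acc ++ [(k, v)]).filter (fun p => p.1 == k') =
      acc.filter (fun p => p.1 == k') ++ (if k = k' then [(k, v)] else []) := by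
    intro k'
    rw [List.filter_append]
    by_cases h : k = k' <;> simp [h]
  by_cases hk : k ∈ acc.map Prod.fst
  · simp only [hk, decide_true, if_true]
    show PySem.Dict.mk _ = _
    congr 1
    unfold pvGrp
    have hded : PySem.List.dedup ((acc ++ [(k, v)]).map Prod.fst) =
        PySem.List.dedup (acc.map Prod.fst) := by
      rw [List.map_append, List.map_singleton, dedup_append_singleton, if_pos hk]
    rw [hded, List.map_map]
    apply List.map_congr_left
    intro k' hk'
    by_cases h : k' = k
    · subst h
      simp only [Function.comp_apply, beq_self_eq_true, if_true]
      rw [hfilter k', if_pos rfl, List.map_append, List.map_singleton,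
        ofList_append_singleton]
    · have hb : (k' == k) = false := by simp [h]
      simp [Function.comp_apply, hfilter k', show ¬k = k' from fun hh => h hh.symm]
      exact h
  · simp only [hk, decide_false]
    show PySem.Dict.mk _ = _
    congr 1
    unfold pvGrp
    have hded : PySem.List.dedup ((acc ++ [(k, v)]).map Prod.fst) =
        PySem.List.dedup (acc.map Prod.fst) ++ [k] := by
      rw [List.map_append, List.map_singleton, dedup_append_singleton, if_neg hk]
    rw [hded, List.map_append, List.map_singleton]
    have hnil : acc.filter (fun p => p.1 == k) = [] := by
      rw [List.filter_eq_nil_iff]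
      intro p hp hpk
      exact hk (List.mem_map.mpr ⟨p, hp, by simpa using hpk⟩)
    congr 1
    · apply List.map_congr_left
      intro k' hk'
      have hne : k ≠ k' := by
        rintro rfl
        exact hk ((PySem.List.mem_dedup _ _).1 hk')
      rw [hfilter k', if_neg hne, List.append_nil]
    · rw [hfilter k, if_pos rfl, hnil, List.nil_append, List.map_singleton]
      rfl

theorem fold_grp (ps acc : List (String × (String × String))) :
    ps.foldl
      (fun (d : PySem.Dict String (PySem.Set (String × String))) p =>
        PySem.Dict.modify d p.1 PySem.Set.empty (fun s => PySem.Set.add s p.2))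
      ⟨pvGrp acc⟩ = ⟨pvGrp (acc ++ ps)⟩ := by
  induction ps generalizing acc with
  | nil => simp
  | cons p t ih =>
    obtain ⟨k, v⟩ := p
    rw [List.foldl_cons]
    show t.foldl _ (PySem.Dict.modify _ k PySem.Set.empty (fun s => PySem.Set.add s v)) = _
    rw [modify_grp, ih]
    simp

-- ===== VERDICT (by name: the statement is the Claim_ definition above) =====
theorem hub_section_map_py_spec : Claim_equal_hub_section_map_py := by
  intro links _ _
  unfold Spec_hub_section_map_py
  rw [alt_eq_grp]
  show (links.foldl _ PySem.Dict.empty).items = _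
  have h1 : links.foldl
      (fun (d : PySem.Dict String (PySem.Set (String × String))) link =>
        if AI_FRAMEWORKS.contains (pvLinkD link "standard_name" "") then
          PySem.Dict.modify d (pvLinkD link "cre_id" "") PySem.Set.empty
            (fun s => PySem.Set.add s (pvLinkD link "standard_name" "", pvLinkD link "section_name" ""))
        else d)
      PySem.Dict.empty =
      (pvPairs links).foldl
        (fun (d : PySem.Dict String (PySem.Set (String × String))) p =>
          PySem.Dict.modify d p.1 PySem.Set.empty (fun s => PySem.Set.add s p.2))
        PySem.Dict.empty := by
    unfold pvPairs
    rw [List.foldl_map, List.foldl_filter]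
  rw [h1,
    show (PySem.Dict.empty : PySem.Dict String (PySem.Set (String × String))) = ⟨pvGrp []⟩ from rfl,
    fold_grp, List.nil_append]
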